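-- pv_equiv track=rewrite | github.com/TsaplinIA/adventofcode2023 | test.py | map_join
-- ===== SOURCE A (Python) =====
-- def map_join(first_map: list, second_map: list):
--     map3_list = []
--     borders = set()
--     for a, a_delta, a_count in first_map:
--         borders.add(a+a_delta)
--         borders.add(a+a_delta+a_count)
--     for b, b_delta, b_count in second_map:
--         borders.add(b)
--         borders.add(b+b_count)
--
--     borders = sorted(borders)
--
--     segments = []
--     for i in range(len(borders)-1):
--         segments.append((borders[i], borders[i+1]))
--
--     for segment in segments:
--         segment_start = segment[0]
--
--         left_delta = 0
--         for a, a_delta, a_count in first_map: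
--             if (a + a_delta) <= segment_start < (a + a_delta + a_count):
--                 left_delta = a_delta
--                 break
--
--         right_delta = 0
--         for b, b_delta, b_count in second_map:
--             if b <= segment_start < (b + b_count):
--                 right_delta = b_delta
--                 break
--
--         c = segment_start - left_delta
--         c_delta = left_delta + right_delta
--         c_count = segment[1] - segment[0]
--         map3_list.append((c, c_delta, c_count))
--     return map3_list
-- ===== SOURCE B (Python) =====
-- from bisect import bisect_left
--
--
-- def map_join(first_map: list, second_map: list):
--     pts = ([a + d for a, d, _ in first_map] + [a + d + c for a, d, c in first_map]
--            + [b for b, _, _ in second_map] + [b + c for b, _, c in second_map])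
--     borders = sorted(set(pts))
--     n = max(len(borders) - 1, 0)
--
--     def paint(intervals, lof, hif):
--         # assign each segment's delta at most once: earliest interval in the list wins,
--         # 'unset' is the sorted list of still-unassigned segment indices
--         arr = [0] * n
--         unset = list(range(n))
--         for t in intervals:
--             lo, hi = bisect_left(borders, lof(t)), bisect_left(borders, hif(t))
--             i1, i2 = bisect_left(unset, lo), bisect_left(unset, hi)
--             for j in unset[i1:i2]:
--                 arr[j] = t[1]
--             del unset[i1:i2]
--         return arr
--
--     left = paint(first_map, lambda t: t[0] + t[1], lambda t: t[0] + t[1] + t[2])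
--     right = paint(second_map, lambda t: t[0], lambda t: t[0] + t[2])
--     return [(borders[i] - left[i], left[i] + right[i], borders[i + 1] - borders[i])
--             for i in range(n)]
-- ===== Notes on version B (the rewrite author's own statement) =====
-- stated objective: faster
-- what changed: Instead of linearly scanning both interval lists for every segment, B sorts the deduplicated borders once, locates each interval's covered segment range with bisect_left, and paints each segment's delta at most once by keeping a sorted list of still-unassigned segment indices (bisected and sliced per interval), so the earliest-listed interval wins without any per-segment scan.
import Mathlib
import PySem

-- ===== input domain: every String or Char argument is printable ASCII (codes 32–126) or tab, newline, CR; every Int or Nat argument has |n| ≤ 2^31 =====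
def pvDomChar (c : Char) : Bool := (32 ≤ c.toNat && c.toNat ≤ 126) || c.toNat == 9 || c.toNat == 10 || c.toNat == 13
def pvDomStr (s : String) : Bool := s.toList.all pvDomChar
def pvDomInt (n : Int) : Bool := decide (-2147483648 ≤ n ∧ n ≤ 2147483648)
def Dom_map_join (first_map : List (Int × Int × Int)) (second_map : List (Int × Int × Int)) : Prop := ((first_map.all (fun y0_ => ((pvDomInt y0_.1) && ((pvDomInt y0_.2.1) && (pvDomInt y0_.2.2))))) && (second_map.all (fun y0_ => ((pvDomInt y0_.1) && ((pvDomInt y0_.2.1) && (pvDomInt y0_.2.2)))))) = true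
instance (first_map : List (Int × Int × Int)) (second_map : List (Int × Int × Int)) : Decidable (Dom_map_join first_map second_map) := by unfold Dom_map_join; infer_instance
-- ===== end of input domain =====

-- B replaces A's per-segment linear scans over both interval lists by sorted borders,
-- binary search, and a paint-each-segment-at-most-once sweep (earliest interval wins).

-- ===== PORT A =====
-- A's 'for …: if cond: left_delta = …; break' scan over first_map (default 0)
def pvFirstLeft (first_map : List (Int × Int × Int)) (s : Int) : Int :=
  match first_map with
  | [] => 0
  | (a, a_delta, a_count) :: rest =>
      if a + a_delta ≤ s ∧ s < a + a_delta + a_count then a_delta else pvFirstLeft rest s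

-- A's same scan over second_map
def pvFirstRight (second_map : List (Int × Int × Int)) (s : Int) : Int :=
  match second_map with
  | [] => 0
  | (b, b_delta, b_count) :: rest =>
      if b ≤ s ∧ s < b + b_count then b_delta else pvFirstRight rest s

def map_join (first_map : List (Int × Int × Int)) (second_map : List (Int × Int × Int)) : List (Int × Int × Int) :=
  let borders0 : PySem.Set Int :=
    first_map.foldl (fun bs t => (bs.add (t.1 + t.2.1)).add (t.1 + t.2.1 + t.2.2)) PySem.Set.empty
  let borders1 : PySem.Set Int :=
    second_map.foldl (fun bs t => (bs.add t.1).add (t.1 + t.2.2)) borders0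
  let borders : List Int := PySem.List.sorted borders1 (fun x => x)
  let segments : List (Int × Int) :=
    (PySem.List.pyRange 0 ((borders.length : Int) - 1) 1).foldl
      (fun segs i => segs ++ [(PySem.List.pyGetD borders i 0, PySem.List.pyGetD borders (i + 1) 0)]) []
  segments.foldl (fun m3 seg =>
      let segment_start := seg.1
      let left_delta := pvFirstLeft first_map segment_start
      let right_delta := pvFirstRight second_map segment_start
      m3 ++ [(segment_start - left_delta, left_delta + right_delta, seg.2 - segment_start)]) []

-- ===== PORT B =====
-- Source B's 'paint' closure: fold over the intervals with state (arr, unset);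
-- 'unset[i1:i2]' is PySem.List.slice and 'del unset[i1:i2]' removes exactly that
-- slice, i.e. take i1 ++ drop (i1 + (i2 - i1))  (exact: 0 ≤ i1, i2 ≤ len)
def pvPaint (borders : List Int) (n : Nat) (lof hif : (Int × Int × Int) → Int)
    (intervals : List (Int × Int × Int)) : List Int :=
  (intervals.foldl
    (fun st t =>
      let lo := PySem.List.bisectLeft borders (lof t)
      let hi := PySem.List.bisectLeft borders (hif t)
      let i1 := PySem.List.bisectLeft st.2 ((lo : Nat) : Int)
      let i2 := PySem.List.bisectLeft st.2 ((hi : Nat) : Int)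
      let painted := PySem.List.slice st.2 (some (i1 : Int)) (some (i2 : Int))
      (painted.foldl (fun arr j => PySem.List.pySetD arr j t.2.1) st.1,
       st.2.take i1 ++ st.2.drop (i1 + (i2 - i1))))
    (List.replicate n 0, PySem.List.pyRange 0 (n : Int) 1)).1

def map_join_alt (first_map : List (Int × Int × Int)) (second_map : List (Int × Int × Int)) : List (Int × Int × Int) :=
  let pts : List Int :=
    first_map.map (fun t => t.1 + t.2.1) ++ first_map.map (fun t => t.1 + t.2.1 + t.2.2)
      ++ second_map.map (fun t => t.1) ++ second_map.map (fun t => t.1 + t.2.2)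
  let borders : List Int := PySem.List.sorted (PySem.Set.ofList pts) (fun x => x)
  let n : Nat := borders.length - 1
  let left : List Int :=
    pvPaint borders n (fun t => t.1 + t.2.1) (fun t => t.1 + t.2.1 + t.2.2) first_map
  let right : List Int :=
    pvPaint borders n (fun t => t.1) (fun t => t.1 + t.2.2) second_map
  (List.range n).map (fun i =>
    (borders.getD i 0 - left.getD i 0, left.getD i 0 + right.getD i 0,
     borders.getD (i + 1) 0 - borders.getD i 0))

-- ===== PRECONDITION & SPEC =====
def Spec_map_join (first_map : List (Int × Int × Int)) (second_map : List (Int × Int × Int)) (out : List (Int × Int × Int)) : Prop := out = map_join_alt first_map second_map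
instance (first_map : List (Int × Int × Int)) (second_map : List (Int × Int × Int)) (out : List (Int × Int × Int)) : Decidable (Spec_map_join first_map second_map out) := by unfold Spec_map_join; infer_instance

-- ===== CLAIM (what is proved, stated in full; the proofs are below) =====
def Claim_equal_map_join : Prop := ∀ (first_map : List (Int × Int × Int)) (second_map : List (Int × Int × Int)), Dom_map_join first_map second_map → Spec_map_join first_map second_map (map_join first_map second_map)

-- ===== LEMMAS AND PROOFS =====

-- generic form of A's first-match scan (proof-side helper)
def pvScanG (lof hif df : (Int × Int × Int) → Int) (l : List (Int × Int × Int)) (s : Int) : Int :=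
  match l with
  | [] => 0
  | t :: rest => if lof t ≤ s ∧ s < hif t then df t else pvScanG lof hif df rest s

-- does some interval of l cover s?
def pvCoveredB (lof hif : (Int × Int × Int) → Int) (l : List (Int × Int × Int)) (s : Int) : Bool :=
  l.any (fun t => decide (lof t ≤ s) && decide (s < hif t))

theorem pvScanG_of_not_covered (lof hif df : (Int × Int × Int) → Int)
    (l : List (Int × Int × Int)) (s : Int) (h : pvCoveredB lof hif l s = false) :
    pvScanG lof hif df l s = 0 := by
  induction l with
  | nil => rfl
  | cons t rest ih =>
      simp only [pvCoveredB, List.any_cons, Bool.or_eq_false_iff] at h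
      rw [pvScanG, if_neg ?_]
      · exact ih h.2
      · intro hc
        have h1 := h.1
        simp [hc.1, hc.2] at h1

theorem pvFirstLeft_eq_scanG (l : List (Int × Int × Int)) (s : Int) :
    pvFirstLeft l s = pvScanG (fun t => t.1 + t.2.1) (fun t => t.1 + t.2.1 + t.2.2) (fun t => t.2.1) l s := by
  induction l with
  | nil => rfl
  | cons t rest ih => obtain ⟨a, d, c⟩ := t; simp [pvFirstLeft, pvScanG, ih]

theorem pvFirstRight_eq_scanG (l : List (Int × Int × Int)) (s : Int) :
    pvFirstRight l s = pvScanG (fun t => t.1) (fun t => t.1 + t.2.2) (fun t => t.2.1) l s := by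
  induction l with
  | nil => rfl
  | cons t rest ih => obtain ⟨a, d, c⟩ := t; simp [pvFirstRight, pvScanG, ih]

-- A's double-add fold over a map is the plain Set.add fold over the flattened point list
theorem pvFoldl_add2 (l : List (Int × Int × Int)) (f1 f2 : (Int × Int × Int) → Int) (s : PySem.Set Int) :
    l.foldl (fun bs t => (bs.add (f1 t)).add (f2 t)) s
      = (l.flatMap (fun t => [f1 t, f2 t])).foldl PySem.Set.add s := by
  induction l generalizing s with
  | nil => rfl
  | cons t rest ih => simp [List.flatMap_cons, ih]

-- bisect_left bracket on a sorted list
theorem pvBisect_le_iff (xs : List Int) (hb : xs.Pairwise (· ≤ ·)) (k : Nat) (hk : k < xs.length) (x : Int) :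
    PySem.List.bisectLeft xs x ≤ k ↔ x ≤ xs[k] := by
  obtain ⟨hlen, hlt, hge⟩ := PySem.List.bisectLeft_spec xs x hb
  constructor
  · exact fun h => hge k hk h
  · intro h
    by_contra hc
    exact absurd (hlt k hk (by omega)) (by omega)

-- on a sorted list, the slice between the two bisection points is the filter of the
-- window, and deleting it leaves the filter of its complement
theorem pvSortedSliceFilter (u : List Int) (hu : u.Pairwise (· ≤ ·)) (a b : Int) :
    (u.drop (PySem.List.bisectLeft u a)).take (PySem.List.bisectLeft u b - PySem.List.bisectLeft u a)
        = u.filter (fun j => decide (a ≤ j) && decide (j < b))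
    ∧ u.take (PySem.List.bisectLeft u a)
        ++ u.drop (PySem.List.bisectLeft u a + (PySem.List.bisectLeft u b - PySem.List.bisectLeft u a))
        = u.filter (fun j => !(decide (a ≤ j) && decide (j < b))) := by
  obtain ⟨hl1, h1lt, h1ge⟩ := PySem.List.bisectLeft_spec u a hu
  obtain ⟨hl2, h2lt, h2ge⟩ := PySem.List.bisectLeft_spec u b hu
  set i1 := PySem.List.bisectLeft u a with hi1
  set i2 := PySem.List.bisectLeft u b with hi2
  have htake1 : ∀ x ∈ u.take i1, x < a := by
    intro x hx
    rw [List.mem_take_iff_getElem] at hx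
    obtain ⟨p, hp, rfl⟩ := hx
    exact h1lt p (by omega) (by omega)
  have hdrop2 : ∀ x ∈ u.drop i2, b ≤ x := by
    intro x hx
    rw [List.mem_drop_iff_getElem] at hx
    obtain ⟨p, hp, rfl⟩ := hx
    exact h2ge (i2 + p) (by omega) (by omega)
  by_cases hc : i1 ≤ i2
  · have hmid : ∀ x ∈ (u.drop i1).take (i2 - i1), a ≤ x ∧ x < b := by
      intro x hx
      rw [List.mem_take_iff_getElem] at hx
      obtain ⟨p, hp, rfl⟩ := hx
      rw [Nat.lt_min, List.length_drop] at hp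
      rw [List.getElem_drop]
      exact ⟨h1ge (i1 + p) (by omega) (by omega), h2lt (i1 + p) (by omega) (by omega)⟩
    have hsum : i1 + (i2 - i1) = i2 := by omega
    have hsplit : u = u.take i1 ++ ((u.drop i1).take (i2 - i1) ++ u.drop i2) := by
      conv_lhs => rw [← List.take_append_drop i1 u]
      congr 1
      conv_lhs => rw [← List.take_append_drop (i2 - i1) (u.drop i1)]
      rw [List.drop_drop, hsum]
    constructor
    · conv_rhs => rw [hsplit]
      rw [List.filter_append, List.filter_append,
        List.filter_eq_nil_iff.mpr (by intro x hx; have hh := htake1 x hx; simp; omega),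
        List.filter_eq_self.mpr (by intro x hx; obtain ⟨hax, hxb⟩ := hmid x hx; simp [hax, hxb]),
        List.filter_eq_nil_iff.mpr (by intro x hx; have hh := hdrop2 x hx; simp; omega),
        List.nil_append, List.append_nil]
    · conv_rhs => rw [hsplit]
      rw [List.filter_append, List.filter_append,
        List.filter_eq_self.mpr (by intro x hx; have hh := htake1 x hx; simp; omega),
        List.filter_eq_nil_iff.mpr (by intro x hx; obtain ⟨hax, hxb⟩ := hmid x hx; simp [hax, hxb]),
        List.filter_eq_self.mpr (by intro x hx; have hh := hdrop2 x hx; simp; omega),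
        List.nil_append, hsum]
  · have hz : i2 - i1 = 0 := by omega
    have hnone : ∀ x ∈ u, ¬(a ≤ x ∧ x < b) := by
      intro x hx ⟨hax, hxb⟩
      rw [List.mem_iff_getElem] at hx
      obtain ⟨p, hp, rfl⟩ := hx
      by_cases hpi : p < i1
      · exact absurd (h1lt p hp hpi) (by omega)
      · exact absurd (h2ge p hp (by omega)) (by omega)
    constructor
    · rw [hz, List.take_zero]
      exact (List.filter_eq_nil_iff.mpr (by intro x hx; have hh := hnone x hx; simp; omega)).symm
    · rw [hz, Nat.add_zero, List.take_append_drop]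
      exact (List.filter_eq_self.mpr (by intro x hx; have hh := hnone x hx; simp; omega)).symm

-- painting a list of in-range indices sets exactly those entries
theorem pvPaintFold_getD (painted : List Int) (arr : List Int) (n : Nat) (hlen : arr.length = n)
    (hmem : ∀ j ∈ painted, 0 ≤ j ∧ j < (n : Int)) (d : Int) (k : Nat) (hk : k < n) :
    (painted.foldl (fun a j => PySem.List.pySetD a j d) arr).getD k 0
      = if (k : Int) ∈ painted then d else arr.getD k 0 := by
  induction painted generalizing arr with
  | nil => simp
  | cons j rest ih =>
      obtain ⟨hj0, hjn⟩ := hmem j (by simp)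
      rw [List.foldl_cons, PySem.List.pySetD_of_nonneg _ _ hj0,
        ih _ (by rw [List.length_set]; exact hlen) (fun x hx => hmem x (by simp [hx]))]
      by_cases hr : (k : Int) ∈ rest
      · rw [if_pos hr, if_pos (by simp [hr])]
      · rw [if_neg hr]
        rw [List.getD_eq_getElem _ _ (by rw [List.length_set, hlen]; exact hk), List.getElem_set]
        by_cases hjk : j.toNat = k
        · rw [if_pos hjk, if_pos (by simp [List.mem_cons]; left; omega)]
        · rw [if_neg hjk, if_neg (by simp [List.mem_cons, hr]; omega),
            List.getD_eq_getElem _ _ (by omega)]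

theorem pvPaintFold_length (painted : List Int) (arr : List Int) (d : Int) :
    (painted.foldl (fun a j => PySem.List.pySetD a j d) arr).length = arr.length := by
  induction painted generalizing arr with
  | nil => rfl
  | cons j rest ih =>
      rw [List.foldl_cons, ih, PySem.List.length_pySetD]

-- invariant of Source B's paint loop: a segment still unset has seen no covering interval;
-- a set segment holds the delta of its first covering interval
theorem pvPaintLoop_inv (borders : List Int) (hb : borders.Pairwise (· ≤ ·))
    (lof hif : (Int × Int × Int) → Int) (n : Nat) (hn : n = borders.length - 1)
    (l : List (Int × Int × Int)) :
    ∀ (arr u : List Int), arr.length = n → u.Pairwise (· ≤ ·) →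
      (∀ j ∈ u, 0 ≤ j ∧ j < (n : Int)) → ∀ (k : Nat), k < n →
      (l.foldl
        (fun st t =>
          let lo := PySem.List.bisectLeft borders (lof t)
          let hi := PySem.List.bisectLeft borders (hif t)
          let i1 := PySem.List.bisectLeft st.2 ((lo : Nat) : Int)
          let i2 := PySem.List.bisectLeft st.2 ((hi : Nat) : Int)
          let painted := PySem.List.slice st.2 (some (i1 : Int)) (some (i2 : Int))
          (painted.foldl (fun arr j => PySem.List.pySetD arr j t.2.1) st.1,
           st.2.take i1 ++ st.2.drop (i1 + (i2 - i1))))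
        (arr, u)).1.getD k 0
        = if (k : Int) ∈ u ∧ pvCoveredB lof hif l (borders.getD k 0) = true
          then pvScanG lof hif (fun t => t.2.1) l (borders.getD k 0)
          else arr.getD k 0 := by
  induction l with
  | nil =>
      intro arr u _ _ _ k hk
      simp [pvCoveredB]
  | cons t rest ih =>
      intro arr u hlen hu hub k hk
      rw [List.foldl_cons]
      simp only []
      set lo := PySem.List.bisectLeft borders (lof t) with hlo
      set hi := PySem.List.bisectLeft borders (hif t) with hhi
      set i1 := PySem.List.bisectLeft u ((lo : Nat) : Int) with hi1
      set i2 := PySem.List.bisectLeft u ((hi : Nat) : Int) with hi2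
      obtain ⟨hfilt1, hfilt2⟩ := pvSortedSliceFilter u hu ((lo : Nat) : Int) ((hi : Nat) : Int)
      have hslice : PySem.List.slice u (some (i1 : Int)) (some (i2 : Int))
          = u.filter (fun j => decide (((lo : Nat) : Int) ≤ j) && decide (j < ((hi : Nat) : Int))) := by
        rw [PySem.List.slice_natCast, hfilt1]
      set s := borders.getD k 0 with hs
      have hkb : k < borders.length := by omega
      have hsg : s = borders[k] := List.getD_eq_getElem _ _ hkb
      have hcnd : ∀ j : Int, j = (k : Int) →
          ((((lo : Nat) : Int) ≤ j ∧ j < ((hi : Nat) : Int)) ↔ (lof t ≤ s ∧ s < hif t)) := by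
        intro j hj
        subst hj
        have e1 : lo ≤ k ↔ lof t ≤ borders[k] := pvBisect_le_iff borders hb k hkb (lof t)
        have e2 : hi ≤ k ↔ hif t ≤ borders[k] := pvBisect_le_iff borders hb k hkb (hif t)
        rw [hsg]
        constructor
        · intro ⟨h1, h2⟩
          refine ⟨e1.mp (by omega), ?_⟩
          by_contra hcc
          have := e2.mpr (by omega)
          omega
        · intro ⟨h1, h2⟩
          have g1 : lo ≤ k := by
            by_contra hcc
            have : ¬ (lof t ≤ borders[k]) := fun hh => hcc (e1.mpr hh)
            omega
          have g2 : ¬ (hi ≤ k) := fun hh => by have := e2.mp hh; omega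
          constructor <;> [exact_mod_cast g1; omega]
      have hmempaint : ((k : Int) ∈ u.filter (fun j => decide (((lo : Nat) : Int) ≤ j) && decide (j < ((hi : Nat) : Int))))
          ↔ ((k : Int) ∈ u ∧ (lof t ≤ s ∧ s < hif t)) := by
        rw [List.mem_filter]
        constructor
        · intro ⟨h1, h2⟩
          exact ⟨h1, (hcnd _ rfl).mp (by simpa using h2)⟩
        · intro ⟨h1, h2⟩
          exact ⟨h1, by simpa using (hcnd _ rfl).mpr h2⟩
      have hmemu2 : ((k : Int) ∈ u.filter (fun j => !(decide (((lo : Nat) : Int) ≤ j) && decide (j < ((hi : Nat) : Int)))))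
          ↔ ((k : Int) ∈ u ∧ ¬ (lof t ≤ s ∧ s < hif t)) := by
        rw [List.mem_filter]
        constructor
        · intro ⟨h1, h2⟩
          refine ⟨h1, fun hc => ?_⟩
          have := (hcnd _ rfl).mpr hc
          simp [this.1, this.2] at h2
        · intro ⟨h1, h2⟩
          refine ⟨h1, ?_⟩
          have : ¬ (((lo : Nat) : Int) ≤ (k : Int) ∧ (k : Int) < ((hi : Nat) : Int)) :=
            fun hc => h2 ((hcnd _ rfl).mp hc)
          have hd : ¬ (((lo : Nat) : Int) ≤ (k : Int)) ∨ ¬ ((k : Int) < ((hi : Nat) : Int)) := by tauto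
          rcases hd with hd | hd <;> simp [hd]
      rw [hslice, hfilt2]
      have harr2len : (((u.filter (fun j => decide (((lo : Nat) : Int) ≤ j) && decide (j < ((hi : Nat) : Int)))).foldl
          (fun arr j => PySem.List.pySetD arr j t.2.1) arr)).length = n := by
        rw [pvPaintFold_length]; exact hlen
      have hu2p : (u.filter (fun j => !(decide (((lo : Nat) : Int) ≤ j) && decide (j < ((hi : Nat) : Int))))).Pairwise (· ≤ ·) :=
        hu.filter _
      have hu2b : ∀ j ∈ u.filter (fun j => !(decide (((lo : Nat) : Int) ≤ j) && decide (j < ((hi : Nat) : Int)))),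
          0 ≤ j ∧ j < (n : Int) := fun j hj => hub j (List.mem_of_mem_filter hj)
      rw [ih _ _ harr2len hu2p hu2b k hk]
      rw [pvPaintFold_getD _ _ n hlen
        (fun j hj => hub j (List.mem_of_mem_filter hj)) _ k hk]
      simp only [hmemu2, hmempaint]
      have hcov : pvCoveredB lof hif (t :: rest) s
          = ((decide (lof t ≤ s) && decide (s < hif t)) || pvCoveredB lof hif rest s) := by
        simp [pvCoveredB]
      rw [hcov, pvScanG]
      by_cases hku : (k : Int) ∈ u
      · by_cases hct : lof t ≤ s ∧ s < hif t
        · simp [hku, hct]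
        · have hs' : borders[k]?.getD 0 = s := by rw [hs, List.getD_eq_getElem?_getD]
          by_cases hcr : pvCoveredB lof hif rest s = true
          · simp [hku, hct, hcr, hs']
          · simp [hku, hct, hcr, hs']
      · simp [hku]

-- the paint sweep computes A's first-match scan at every segment index
theorem pvPaint_getD (borders : List Int) (hb : borders.Pairwise (· ≤ ·))
    (lof hif : (Int × Int × Int) → Int) (l : List (Int × Int × Int))
    (n : Nat) (hn : n = borders.length - 1) (k : Nat) (hk : k < n) :
    (pvPaint borders n lof hif l).getD k 0
      = pvScanG lof hif (fun t => t.2.1) l (borders.getD k 0) := by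
  unfold pvPaint
  rw [pvPaintLoop_inv borders hb lof hif n hn l (List.replicate n 0) (PySem.List.pyRange 0 (n : Int) 1)
    (by simp) ((PySem.List.pairwise_lt_pyRange_one 0 (n : Int) ).imp (fun h => le_of_lt h))
    (by intro j hj; rw [PySem.List.mem_pyRange_one] at hj; omega) k hk]
  by_cases hcov : pvCoveredB lof hif l (borders.getD k 0) = true
  · rw [if_pos ⟨by rw [PySem.List.mem_pyRange_one]; constructor <;> [positivity; exact_mod_cast hk], hcov⟩]
  · rw [if_neg (fun hc => hcov hc.2), List.getD_replicate _ hk,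
      pvScanG_of_not_covered _ _ _ _ _ (Bool.eq_false_iff.mpr hcov)]

-- ===== VERDICT (by name: the statement is the Claim_ definition above) =====
theorem map_join_spec : Claim_equal_map_join := by
  intro fm sm _
  unfold Spec_map_join map_join map_join_alt
  simp only []
  set ptsA : List Int := fm.flatMap (fun t => [t.1 + t.2.1, t.1 + t.2.1 + t.2.2])
      ++ sm.flatMap (fun t => [t.1, t.1 + t.2.2]) with hptsA
  set ptsB : List Int := fm.map (fun t => t.1 + t.2.1) ++ fm.map (fun t => t.1 + t.2.1 + t.2.2)
      ++ sm.map (fun t => t.1) ++ sm.map (fun t => t.1 + t.2.2) with hptsB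
  have hset : sm.foldl (fun bs t => (bs.add t.1).add (t.1 + t.2.2))
      (fm.foldl (fun bs t => (bs.add (t.1 + t.2.1)).add (t.1 + t.2.1 + t.2.2)) PySem.Set.empty)
      = PySem.Set.ofList ptsA := by
    rw [pvFoldl_add2, pvFoldl_add2, hptsA, PySem.Set.ofList_eq_foldl, List.foldl_append]
    rfl
  rw [hset]
  have hperm : (PySem.Set.ofList ptsA).Perm (PySem.Set.ofList ptsB) := by
    rw [List.perm_ext_iff_of_nodup (PySem.Set.nodup_ofList _) (PySem.Set.nodup_ofList _)]
    intro x
    simp only [PySem.Set.mem_ofList, hptsA, hptsB, List.mem_append, List.mem_flatMap,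
      List.mem_map, List.mem_cons, List.not_mem_nil, or_false, and_or_left, exists_or, eq_comm]
    exact or_assoc.symm
  rw [PySem.List.sorted_eq_sorted_of_perm _ _ _ (fun a b h => h) hperm]
  set borders := PySem.List.sorted (PySem.Set.ofList ptsB) (fun x => x) with hbord
  have hple : borders.Pairwise (· ≤ ·) :=
    (PySem.List.sorted_ofList_pairwise_lt ptsB).imp le_of_lt
  set n : Nat := borders.length - 1 with hn
  simp only [PySem.List.foldl_append_singleton_eq_map, List.nil_append, List.map_map]
  rw [PySem.List.pyRange_one]
  have hnn : (((borders.length : Int) - 1) - 0).toNat = n := by omega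
  rw [hnn, List.map_map]
  apply List.map_congr_left
  intro k hk
  rw [List.mem_range] at hk
  simp only [Function.comp_apply]
  have hleft := pvPaint_getD borders hple (fun t => t.1 + t.2.1)
      (fun t => t.1 + t.2.1 + t.2.2) fm n hn k hk
  have hright := pvPaint_getD borders hple (fun t => t.1)
      (fun t => t.1 + t.2.2) sm n hn k hk
  rw [hleft, hright, ← pvFirstLeft_eq_scanG, ← pvFirstRight_eq_scanG]
  have e1 : (0 : Int) + (k : Int) = ((k : Nat) : Int) := by ring
  have e2 : ((k : Int)) + 1 = (((k + 1 : Nat)) : Int) := by push_cast; ring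
  rw [e1, PySem.List.pyGetD_natCast, e2, PySem.List.pyGetD_natCast]
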